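-- pv_equiv track=rewrite | github.com/Connoriginal/autosentence | data_preprocess/data_annotation.py | sentence_length
-- ===== SOURCE A (Python) =====
-- def sentence_length(line):
--     result = 0
--     flag = True
--     for i in line.split(' '):
--         temp = len(i)
--         if(temp >= MAX_WORD) :
--             flag = False
--             break
--         result += temp
--
--     if flag :
--         return flag, result
--     else :
--         return flag, 0
--
-- MAX_WORD = 10
-- ===== SOURCE B (Python) =====
-- MAX_WORD = 10
--
-- def sentence_length(line):
--     # Character-level scan: track the length of the current run of non-space
--     # characters; bail out as soon as a run reaches MAX_WORD.  The total word
--     # length is then len(line) minus the number of spaces (each space separates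
--     # words and contributes 0), so no word list is ever built.
--     run = 0
--     spaces = 0
--     for ch in line:
--         if ch == ' ':
--             run = 0
--             spaces += 1
--         else:
--             run += 1
--             if run >= MAX_WORD:
--                 return False, 0
--     return True, len(line) - spaces
-- ===== Notes on version B (the rewrite author's own statement) =====
-- stated objective: alternative
-- what changed: Replaces the loop over the split word list accumulating word lengths with a single character-level scan that never builds a word list: it tracks the current non-space run length (failing once a run reaches MAX_WORD) and counts the space characters, returning the line length minus the space count as the total.
import Mathlib
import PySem

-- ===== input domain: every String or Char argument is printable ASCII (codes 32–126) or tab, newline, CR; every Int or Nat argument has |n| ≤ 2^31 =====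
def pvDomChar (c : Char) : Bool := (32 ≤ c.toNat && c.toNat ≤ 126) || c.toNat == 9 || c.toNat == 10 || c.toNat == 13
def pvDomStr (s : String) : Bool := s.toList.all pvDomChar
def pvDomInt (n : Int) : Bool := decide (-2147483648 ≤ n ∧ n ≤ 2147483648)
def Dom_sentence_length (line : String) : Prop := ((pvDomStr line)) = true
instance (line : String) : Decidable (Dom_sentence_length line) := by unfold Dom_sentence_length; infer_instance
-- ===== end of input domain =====

-- B replaces A's word-list loop over line.split(' ') by a single character-level scan
-- that tracks the current non-space run length and counts spaces, returning
-- len(line) - spaces as the total word length (objective: alternative algorithm,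
-- no word list is ever materialised).

-- ===== PORT A =====
-- the for-loop over the words with break: state (result, flag); break returns immediately
def pvLoopA : List String → Int → Bool × Int
  | [], result => (true, result)
  | w :: ws, result =>
    let temp := PySem.Str.len w
    if temp ≥ 10 then (false, result) else pvLoopA ws (result + temp)

def sentence_length (line : String) : Bool × Int :=
  let p := pvLoopA ((PySem.Str.split? line " ").getD []) 0
  if p.1 then (p.1, p.2) else (p.1, 0)

-- ===== PORT B =====
-- the for-loop over the characters: state (run, spaces); the early 'return False, 0'
-- becomes the (false, _) result, mapped to (false, 0) in the wrapper
def pvScanB : List Char → Nat → Nat → Bool × Nat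
  | [], _, spaces => (true, spaces)
  | c :: cs, run, spaces =>
    if c = ' ' then pvScanB cs 0 (spaces + 1)
    else if run + 1 ≥ 10 then (false, spaces)
    else pvScanB cs (run + 1) spaces

def sentence_length_alt (line : String) : Bool × Int :=
  match pvScanB line.toList 0 0 with
  | (false, _) => (false, 0)
  | (true, spaces) => (true, PySem.Str.len line - (spaces : Int))

-- ===== PRECONDITION & SPEC =====
def Spec_sentence_length (line : String) (out : Bool × Int) : Prop := out = sentence_length_alt line
instance (line : String) (out : Bool × Int) : Decidable (Spec_sentence_length line out) := by unfold Spec_sentence_length; infer_instance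

-- ===== CLAIM (what is proved, stated in full; the proofs are below) =====
def Claim_equal_sentence_length : Prop := ∀ (line : String), Dom_sentence_length line → Spec_sentence_length line (sentence_length line)

-- ===== LEMMAS AND PROOFS =====

-- reference splitter: the word list of cs.split(' '), by direct structural recursion
def pvWords : List Char → List (List Char)
  | [] => [[]]
  | c :: cs =>
    if c = ' ' then [] :: pvWords cs
    else match pvWords cs with
      | [] => [[c]]      -- unreachable: pvWords is never []
      | w :: t => (c :: w) :: t

theorem pvWords_ne_nil (cs : List Char) : pvWords cs ≠ [] := by
  cases cs with
  | nil => simp [pvWords]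
  | cons c cs =>
    simp only [pvWords]
    split
    · simp
    · split <;> simp

def pvConsHead (pre : List Char) : List (List Char) → List (List Char)
  | [] => [pre]
  | w :: t => (pre ++ w) :: t

theorem pvGo_zero (l cur : List Char) (acc : List (List Char)) :
    PySem.Chars.splitOn.go [' '] 0 l cur acc = ((cur.reverse ++ l) :: acc).reverse := by
  rw [PySem.Chars.splitOn.go]

theorem pvGo_nil_succ (fuel : Nat) (cur : List Char) (acc : List (List Char)) :
    PySem.Chars.splitOn.go [' '] (fuel+1) [] cur acc = (cur.reverse :: acc).reverse := by
  rw [PySem.Chars.splitOn.go]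
  simp

theorem pvGo_space (fuel : Nat) (rest cur : List Char) (acc : List (List Char)) :
    PySem.Chars.splitOn.go [' '] (fuel+1) (' ' :: rest) cur acc
      = PySem.Chars.splitOn.go [' '] fuel rest [] (cur.reverse :: acc) := by
  rw [PySem.Chars.splitOn.go]
  simp [List.isPrefixOf]

theorem pvGo_nospace (fuel : Nat) (c : Char) (rest cur : List Char) (acc : List (List Char)) (h : c ≠ ' ') :
    PySem.Chars.splitOn.go [' '] (fuel+1) (c :: rest) cur acc
      = PySem.Chars.splitOn.go [' '] fuel rest (c :: cur) acc := by
  rw [PySem.Chars.splitOn.go]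
  simp [List.isPrefixOf, Ne.symm h]

theorem pvGo_eq (fuel : Nat) (l cur : List Char) (acc : List (List Char))
    (h : l.length ≤ fuel) :
    PySem.Chars.splitOn.go [' '] fuel l cur acc
      = acc.reverse ++ pvConsHead cur.reverse (pvWords l) := by
  induction fuel generalizing l cur acc with
  | zero =>
    have : l = [] := by cases l <;> simp_all
    subst this
    rw [pvGo_zero]
    simp [pvWords, pvConsHead]
  | succ fuel ih =>
    cases l with
    | nil =>
      rw [pvGo_nil_succ]
      simp [pvWords, pvConsHead]
    | cons c rest =>
      by_cases hc : c = ' '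
      · subst hc
        rw [pvGo_space, ih rest [] (cur.reverse :: acc) (by simpa using Nat.le_of_succ_le_succ h)]
        simp only [pvWords]
        cases hw : pvWords rest with
        | nil => exact absurd hw (pvWords_ne_nil rest)
        | cons w t => simp [pvConsHead]
      · rw [pvGo_nospace fuel c rest cur acc hc,
           ih rest (c :: cur) acc (by simpa using Nat.le_of_succ_le_succ h)]
        simp only [pvWords, if_neg hc]
        cases hw : pvWords rest with
        | nil => exact absurd hw (pvWords_ne_nil rest)
        | cons w t => simp [pvConsHead]

theorem splitOn_eq_pvWords (cs : List Char) :
    PySem.Chars.splitOn cs [' '] = pvWords cs := by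
  unfold PySem.Chars.splitOn
  rw [pvGo_eq _ _ _ _ (by omega)]
  cases hw : pvWords cs with
  | nil => exact absurd hw (pvWords_ne_nil cs)
  | cons w t => simp [pvConsHead]

-- total word length: |cs| = Σ lengths + number of spaces
theorem pvWords_sum (cs : List Char) :
    cs.length = ((pvWords cs).map List.length).sum + cs.count ' ' := by
  induction cs with
  | nil => simp [pvWords]
  | cons c cs ih =>
    by_cases hc : c = ' '
    · subst hc; simp [pvWords, ih]; omega
    · simp only [pvWords, if_neg hc]
      cases hw : pvWords cs with
      | nil => exact absurd hw (pvWords_ne_nil cs)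
      | cons w t =>
        rw [hw] at ih
        simp_all
        omega

-- A's word loop, characterised
theorem pvLoopA_char (ws : List (List Char)) (r : Int) :
    (pvLoopA (ws.map String.ofList) r).1 = ws.all (fun w => decide (w.length < 10))
    ∧ (ws.all (fun w => decide (w.length < 10)) = true →
        (pvLoopA (ws.map String.ofList) r).2 = r + ((ws.map List.length).sum : Int)) := by
  induction ws generalizing r with
  | nil => simp [pvLoopA]
  | cons w t ih =>
    simp only [List.map_cons, pvLoopA, PySem.Str.len_eq, String.toList_ofList, List.all_cons]
    by_cases h : ((w.length : Int) ≥ 10)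
    · have : ¬ w.length < 10 := by omega
      simp [this, h]
    · have h10 : w.length < 10 := by omega
      rw [if_neg h]
      refine ⟨by simp [h10, (ih _).1], ?_⟩
      intro hall
      simp only [h10, decide_true, Bool.true_and] at hall
      rw [(ih (r + w.length)).2 hall]
      push_cast
      rw [List.map_cons, List.sum_cons]
      ring

-- B's scan, characterised against the word list (invariant: run < 10 is
-- the length of the current partial word)
theorem pvScanB_char (cs : List Char) (run spaces : Nat) (hrun : run < 10) :
    (pvScanB cs run spaces).1
      = (match pvWords cs with
         | [] => true
         | w :: t => decide (run + w.length < 10) && t.all (fun w => decide (w.length < 10)))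
    ∧ ((pvScanB cs run spaces).1 = true → (pvScanB cs run spaces).2 = spaces + cs.count ' ') := by
  induction cs generalizing run spaces with
  | nil => simp [pvScanB, pvWords, hrun]
  | cons c cs ih =>
    by_cases hc : c = ' '
    · subst hc
      simp only [pvScanB, pvWords, reduceIte]
      have h0 : (0 : Nat) < 10 := by omega
      obtain ⟨h1, h2⟩ := ih 0 (spaces + 1) h0
      refine ⟨?_, ?_⟩
      · rw [h1]
        cases hw : pvWords cs with
        | nil => exact absurd hw (pvWords_ne_nil cs)
        | cons w t => simp [hrun]
      · intro hok
        rw [h2 hok]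
        simp
        omega
    · simp only [pvScanB, if_neg hc, pvWords]
      by_cases hb : run + 1 ≥ 10
      · rw [if_pos hb]
        cases hw : pvWords cs with
        | nil => exact absurd hw (pvWords_ne_nil cs)
        | cons w t =>
          constructor
          · have : ¬ run + (w.length + 1) < 10 := by omega
            simp [this]
          · intro h; simp at h
      · rw [if_neg hb]
        have hr1 : run + 1 < 10 := by omega
        obtain ⟨h1, h2⟩ := ih (run + 1) spaces hr1
        refine ⟨?_, ?_⟩
        · rw [h1]
          cases hw : pvWords cs with
          | nil => exact absurd hw (pvWords_ne_nil cs)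
          | cons w t =>
            simp only [List.length_cons]
            have h3 : (run + 1 + w.length < 10) ↔ (run + (w.length + 1) < 10) := by omega
            rw [decide_eq_decide.mpr h3]
        · intro hok
          rw [h2 hok]
          simp [hc]

-- ===== VERDICT (by name: the statement is the Claim_ definition above) =====
theorem sentence_length_spec : Claim_equal_sentence_length := by
  intro line _
  unfold Spec_sentence_length sentence_length sentence_length_alt
  have hsplit : (PySem.Str.split? line " ").getD []
      = (pvWords line.toList).map String.ofList := by
    unfold PySem.Str.split?
    simp [PySem.Chars.split?, splitOn_eq_pvWords]
  rw [hsplit]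
  obtain ⟨ha1, ha2⟩ := pvLoopA_char (pvWords line.toList) 0
  obtain ⟨hb1, hb2⟩ := pvScanB_char line.toList 0 0 (by omega)
  have hflag : (pvScanB line.toList 0 0).1
      = (pvWords line.toList).all (fun w => decide (w.length < 10)) := by
    rw [hb1]
    cases hw : pvWords line.toList with
    | nil => exact absurd hw (pvWords_ne_nil _)
    | cons w t => simp
  rcases hA : pvLoopA ((pvWords line.toList).map String.ofList) 0 with ⟨fa, ra⟩
  rcases hB : pvScanB line.toList 0 0 with ⟨fb, sb⟩
  rw [hA] at ha1 ha2
  rw [hB] at hflag hb2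
  simp only []
  simp only at ha1 ha2 hflag hb2
  cases hok : (pvWords line.toList).all (fun w => decide (w.length < 10)) with
  | false =>
    rw [hok] at ha1 hflag
    subst ha1; subst hflag
    simp
  | true =>
    rw [hok] at ha1 hflag
    subst ha1; subst hflag
    have hra := ha2 hok
    have hsb := hb2 rfl
    have hsum := pvWords_sum line.toList
    simp only [hra, hsb, PySem.Str.len_eq, reduceIte]
    refine Prod.ext rfl ?_
    simp only []
    omega
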